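-- pv_equiv track=rewrite | github.com/wamonite/advent-of-code-2020 | day14.py | generate_bitmasks
-- ===== SOURCE A (Python) =====
-- from itertools import product
--
-- def generate_bitmasks(mask_val):
--     bit_count = 0
--     shift_val = mask_val
--     while shift_val:
--         if shift_val & 1:
--             bit_count += 1
--
--         shift_val >>= 1
--
--     combination_list = list(product(range(2), repeat = bit_count))
--     bit_mask_list = [0] * len(combination_list)
--     check_bit = 1
--     msb = 1 << 36
--     combination_idx = 0
--     for _ in range(36):
--         check_val = mask_val & check_bit
--
--         for bit_mask_idx, combination in enumerate(combination_list):
--             if check_val and combination[combination_idx]: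
--                 bit_mask_list[bit_mask_idx] |= msb
--             bit_mask_list[bit_mask_idx] >>= 1
--
--         check_bit <<= 1
--         if check_val:
--             combination_idx += 1
--
--     return bit_mask_list
-- ===== SOURCE B (Python) =====
-- from itertools import product
--
--
-- def generate_bitmasks(mask_val):
--     positions = [i for i in range(36) if mask_val & (1 << i)]
--     bit_count = bin(mask_val).count("1")
--     return [sum(c << p for c, p in zip(comb, positions))
--             for comb in product(range(2), repeat=bit_count)]
-- ===== Notes on version B (the rewrite author's own statement) =====
-- stated objective: simpler
-- what changed: Replaces A's column sweep over all address-bit rounds (per result entry: OR the chosen bit in at the top position, then right-shift every entry each round, tracking check_bit and combination_idx state) by a direct per-combination construction: collect the set-bit positions once and build each value as the sum of the chosen bits shifted to their positions.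
import Mathlib
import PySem

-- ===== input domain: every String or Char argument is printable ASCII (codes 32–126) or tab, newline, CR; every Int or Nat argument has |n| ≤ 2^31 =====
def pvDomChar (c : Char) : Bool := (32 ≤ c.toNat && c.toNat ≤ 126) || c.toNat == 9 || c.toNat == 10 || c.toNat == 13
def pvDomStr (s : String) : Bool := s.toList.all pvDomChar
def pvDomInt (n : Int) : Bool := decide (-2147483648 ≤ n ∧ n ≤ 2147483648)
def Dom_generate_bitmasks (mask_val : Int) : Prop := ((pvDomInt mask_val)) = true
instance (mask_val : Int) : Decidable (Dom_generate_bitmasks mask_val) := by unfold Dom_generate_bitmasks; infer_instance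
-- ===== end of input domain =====

-- B replaces A's shift-and-OR column sweep over the address-bit rounds by building each value
-- directly as a sum of the chosen bits at their positions; objective: simpler (equal RETURN
-- values on Pre_: 0 ≤ mask_val).

-- ===== PORT A =====
-- itertools.product(range(2), repeat = n) in CPython's lexicographic order (used by both ports)
def pvProduct01 : Nat → List (List Int)
  | 0 => [[]]
  | n + 1 => ([0, 1] : List Int).flatMap (fun x => (pvProduct01 n).map (fun rest => x :: rest))

-- A's 'while shift_val:' popcount loop; Python diverges on negative mask_val (excluded by
-- Pre_generate_bitmasks), so the Lean guard exits on shift_val ≤ 0 to be total; exact for 0 ≤ shift_val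
def pvShiftLoop (shift_val : Int) (bit_count : Int) : Int :=
  if h : 0 < shift_val then
    pvShiftLoop (shift_val >>> (1 : Nat))
      (if PySem.Int.band shift_val 1 ≠ 0 then bit_count + 1 else bit_count)
  else bit_count
termination_by shift_val.toNat
decreasing_by rw [Int.shiftRight_eq_div_pow]; omega

-- the body of A's 'for _ in range(36)' loop; state = (bit_mask_list, check_bit, combination_idx)
def pvStepA (mask_val : Int) (combination_list : List (List Int))
    (st : List Int × Int × Int) (_x : Nat) : List Int × Int × Int :=
  let check_val := PySem.Int.band mask_val st.2.1
  let bml := (st.1.zip combination_list).map (fun (p : Int × List Int) =>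
      (if check_val ≠ 0 then
         (if PySem.List.pyGetD p.2 st.2.2 0 ≠ 0 then PySem.Int.bor p.1 ((1 : Int) <<< 36) else p.1)
       else p.1) >>> (1 : Nat))
  (bml, st.2.1 <<< (1 : Nat), if check_val ≠ 0 then st.2.2 + 1 else st.2.2)

def generate_bitmasks (mask_val : Int) : List Int :=
  let bit_count := pvShiftLoop mask_val 0
  let combination_list := pvProduct01 bit_count.toNat
  let bit_mask_list : List Int := List.replicate combination_list.length 0
  ((List.range 36).foldl (pvStepA mask_val combination_list) (bit_mask_list, 1, 0)).1

-- ===== PORT B =====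
def generate_bitmasks_alt (mask_val : Int) : List Int :=
  let positions : List Nat :=
    (List.range 36).filter (fun i => decide (PySem.Int.band mask_val ((1 : Int) <<< i) ≠ 0))
  let bit_count := PySem.Int.bitCount mask_val    -- bin(mask_val).count("1")
  (pvProduct01 bit_count).map (fun comb =>
    ((comb.zip positions).map (fun cp => cp.1 <<< cp.2)).sum)

-- ===== PRECONDITION & SPEC =====
-- Pre_ excludes negative mask_val, on which A's 'while shift_val:' loop never terminates
def Pre_generate_bitmasks (mask_val : Int) : Prop := 0 ≤ mask_val
instance (mask_val : Int) : Decidable (Pre_generate_bitmasks mask_val) := by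
  unfold Pre_generate_bitmasks; infer_instance
def pvWitness_generate_bitmasks : Int := 42

def Spec_generate_bitmasks (mask_val : Int) (out : List Int) : Prop := out = generate_bitmasks_alt mask_val
instance (mask_val : Int) (out : List Int) : Decidable (Spec_generate_bitmasks mask_val out) := by
  unfold Spec_generate_bitmasks; infer_instance

-- ===== CLAIM (what is proved, stated in full; the proofs are below) =====
def Claim_equal_generate_bitmasks : Prop := ∀ (mask_val : Int), Dom_generate_bitmasks mask_val → Pre_generate_bitmasks mask_val → Spec_generate_bitmasks mask_val (generate_bitmasks mask_val)

-- ===== LEMMAS AND PROOFS =====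

-- the set-bit positions of m below t, increasing (t = 36 gives B's 'positions')
def pvBits (m : Int) (t : Nat) : List Nat :=
  (List.range t).filter (fun i => decide (PySem.Int.band m ((1 : Int) <<< i) ≠ 0))

-- B's per-combination value restricted to bits below t
def pvPsum (m : Int) (t : Nat) (c : List Int) : Int :=
  ((c.zip (pvBits m t)).map (fun cp => cp.1 <<< cp.2)).sum

theorem pvShiftLoop_eq (s : Int) (h : 0 ≤ s) (c : Int) :
    pvShiftLoop s c = c + (PySem.Int.bitCount s : Int) := by
  by_cases hp : 0 < s
  · rw [pvShiftLoop]
    simp only [hp, dif_pos]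
    have hdiv : s >>> (1 : Nat) = PySem.Int.floordiv s 2 := by
      rw [Int.shiftRight_eq_div_pow, PySem.Int.floordiv_eq_ediv_of_pos (by omega)]; norm_num
    have h2 : 0 ≤ PySem.Int.floordiv s 2 := by
      rw [PySem.Int.floordiv_eq_ediv_of_pos (by omega)]; omega
    have ih := pvShiftLoop_eq (s >>> (1 : Nat)) (by rw [hdiv]; exact h2)
    rw [hdiv] at ih
    rw [hdiv, PySem.Int.bitCount_of_pos hp, PySem.Int.band_one s]
    have hm0 : 0 ≤ PySem.Int.mod s 2 := PySem.Int.mod_nonneg s (by norm_num)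
    have hm2 : PySem.Int.mod s 2 < 2 := PySem.Int.mod_lt s (by norm_num)
    rcases (by omega : PySem.Int.mod s 2 = 0 ∨ PySem.Int.mod s 2 = 1) with h0 | h1
    · rw [h0, if_neg (by norm_num), ih]
      norm_num
    · rw [h1, if_pos (by norm_num), ih]
      push_cast; ring
  · have hs : s = 0 := by omega
    subst hs
    rw [pvShiftLoop]
    simp [PySem.Int.bitCount_zero]
termination_by s.toNat
decreasing_by rw [Int.shiftRight_eq_div_pow]; omega

theorem mem_pvProduct01 {n : Nat} {c : List Int} (h : c ∈ pvProduct01 n) :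
    ∀ x ∈ c, x = 0 ∨ x = 1 := by
  induction n generalizing c with
  | zero => simp [pvProduct01] at h; subst h; simp
  | succ n ih =>
    simp [pvProduct01] at h
    rcases h with ⟨rest, hr, hc⟩ | ⟨rest, hr, hc⟩ <;> subst hc <;> intro x hx <;>
      rcases List.mem_cons.1 hx with h | h
    · left; exact h
    · exact ih hr x h
    · right; exact h
    · exact ih hr x h

theorem pvBits_succ (m : Int) (t : Nat) :
    pvBits m (t + 1) =
      pvBits m t ++ (if PySem.Int.band m ((1 : Int) <<< t) ≠ 0 then [t] else []) := by
  simp only [pvBits, List.range_succ, List.filter_append, List.filter_cons, List.filter_nil]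
  split <;> simp_all

theorem pvZip_append (l : List Int) (as bs : List Nat) :
    l.zip (as ++ bs) = l.zip as ++ (l.drop as.length).zip bs := by
  induction as generalizing l with
  | nil => simp
  | cons a as ih => cases l <;> simp [ih]

theorem pvPsum_succ (m : Int) (t : Nat) (c : List Int) :
    pvPsum m (t + 1) c = pvPsum m t c +
      (if PySem.Int.band m ((1 : Int) <<< t) ≠ 0
       then (c.getD (pvBits m t).length 0) <<< t else 0) := by
  unfold pvPsum
  rw [pvBits_succ]
  split
  · rw [pvZip_append, List.map_append, List.sum_append]
    congr 1
    rcases hd : c.drop (pvBits m t).length with _ | ⟨a, rest⟩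
    · have hlen : c.length ≤ (pvBits m t).length := by
        have := congrArg List.length hd; simp at this; omega
      rw [List.getD_eq_getElem?_getD, List.getElem?_eq_none (by omega)]
      simp
    · have ha : c.getD (pvBits m t).length 0 = a := by
        rw [List.getD_eq_getElem?_getD, ← List.head?_drop, hd]; rfl
      rw [ha]; simp
  · simp

theorem pvGetD01 (c : List Int) (h01 : ∀ x ∈ c, x = 0 ∨ x = 1) (L : Nat) :
    c.getD L 0 = 0 ∨ c.getD L 0 = 1 := by
  rcases lt_or_ge L c.length with hlt | hge
  · have : c.getD L 0 ∈ c := by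
      rw [List.getD_eq_getElem?_getD, List.getElem?_eq_getElem hlt]
      exact List.getElem_mem hlt
    exact h01 _ this
  · left
    rw [List.getD_eq_getElem?_getD, List.getElem?_eq_none (by omega)]; rfl

theorem pvPsum_bounds (m : Int) (t : Nat) (c : List Int) (h01 : ∀ x ∈ c, x = 0 ∨ x = 1) :
    0 ≤ pvPsum m t c ∧ pvPsum m t c < 2 ^ t := by
  induction t with
  | zero => simp [pvPsum, pvBits]
  | succ t ih =>
    rw [pvPsum_succ]
    have hb := pvGetD01 c h01 (pvBits m t).length
    have hpow : (0:Int) < 2 ^ t := by positivity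
    have hps : (2:Int) ^ (t+1) = 2 ^ t + 2 ^ t := by ring
    have hsh : ∀ b : Int, b <<< t = b * 2 ^ t := fun b => Int.shiftLeft_eq b t
    rcases hb with hb | hb <;> rw [hb] <;> split <;> (try simp only [hsh]) <;> constructor <;>
      nlinarith [ih.1, ih.2]

theorem pvBor_msb (v : Int) (hv : 0 ≤ v) (h : v < 2 ^ 36) :
    PySem.Int.bor v ((1 : Int) <<< 36) = v + 2 ^ 36 := by
  have h1 : ((1:Int) <<< 36) = ((68719476736 : Nat) : Int) := by decide
  rw [h1, PySem.Int.bor_of_nonneg hv (by positivity)]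
  have h4 : ((68719476736:Nat):Int).toNat = 68719476736 := rfl
  have h2 : v.toNat ||| 68719476736 = v.toNat + 68719476736 := by
    have h3 : v.toNat < 2^36 := by omega
    have := Nat.two_pow_add_eq_or_of_lt (i := 36) h3 1
    rw [Nat.lor_comm, Nat.mul_one] at this
    norm_num at this ⊢
    omega
  rw [h4, h2]
  push_cast
  norm_num
  omega

theorem pvShiftRight_two_mul (a : Int) : (2 * a) >>> (1 : Nat) = a := by
  rw [Int.shiftRight_eq_div_pow]
  norm_num [Int.mul_ediv_cancel_left]

theorem pvFoldl_inv (m : Int) (combs : List (List Int))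
    (h01 : ∀ c ∈ combs, ∀ x ∈ c, x = 0 ∨ x = 1) (t : Nat) (ht : t ≤ 36) :
    (List.range t).foldl (pvStepA m combs) (List.replicate combs.length 0, 1, 0)
      = (combs.map (fun c => 2 ^ (36 - t) * pvPsum m t c),
         (1 : Int) <<< t, ((pvBits m t).length : Int)) := by
  induction t with
  | zero =>
    simp only [List.range_zero, List.foldl_nil, Prod.mk.injEq]
    refine ⟨?_, by decide, by simp [pvBits]⟩
    simp [pvPsum, pvBits, List.map_const']
  | succ t ih =>
    have ht' : t ≤ 35 := by omega
    rw [List.range_succ, List.foldl_append, ih (by omega)]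
    simp only [List.foldl_cons, List.foldl_nil]
    simp only [pvStepA]
    have hzip : (combs.map (fun c => 2 ^ (36 - t) * pvPsum m t c)).zip combs
        = combs.map (fun c => ((2:Int) ^ (36 - t) * pvPsum m t c, c)) := by
      have h := List.zip_map' (f := fun c : List Int => 2 ^ (36 - t) * pvPsum m t c)
        (g := fun c => c) (l := combs)
      simpa using h
    refine Prod.ext ?_ (Prod.ext ?_ ?_)
    · show ((combs.map (fun c => 2 ^ (36 - t) * pvPsum m t c)).zip combs).map _ = _
      rw [hzip, List.map_map]
      apply List.map_congr_left
      intro c hc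
      simp only [Function.comp]
      have hS := pvPsum_bounds m t c (h01 c hc)
      have hget : PySem.List.pyGetD c (((pvBits m t).length : Nat) : Int) 0
          = c.getD (pvBits m t).length 0 := by
        simp [PySem.List.pyGetD_natCast]
      have h36 : 36 - t = (35 - t) + 1 := by omega
      have h36' : 36 - (t + 1) = 35 - t := by omega
      have hpow1 : (2:Int) ^ (36 - t) = 2 * 2 ^ (35 - t) := by rw [h36, pow_succ]; ring
      have hp36 : (2:Int) ^ (36 - t) * 2 ^ t = 2 ^ 36 := by rw [← pow_add]; congr 1; omega
      have hp35 : (2:Int) ^ (35 - t) * 2 ^ t = 2 ^ 35 := by rw [← pow_add]; congr 1; omega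
      have hsh : ∀ b : Int, b <<< t = b * 2 ^ t := fun b => Int.shiftLeft_eq b t
      rw [pvPsum_succ, h36']
      by_cases hcv : PySem.Int.band m ((1 : Int) <<< t) ≠ 0
      · rw [if_pos hcv, if_pos hcv, hget]
        rcases pvGetD01 c (h01 c hc) (pvBits m t).length with hb | hb <;> rw [hb]
        · rw [if_neg (by norm_num)]
          rw [hpow1, mul_assoc, pvShiftRight_two_mul, hsh]
          ring
        · rw [if_pos (by norm_num)]
          have hvlt : 2 ^ (36 - t) * pvPsum m t c < 2 ^ 36 := by nlinarith [hS.1, hS.2]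
          have hv0 : 0 ≤ 2 ^ (36 - t) * pvPsum m t c := mul_nonneg (by positivity) hS.1
          rw [pvBor_msb _ hv0 hvlt]
          rw [show 2 ^ (36 - t) * pvPsum m t c + 2 ^ 36
              = 2 * (2 ^ (35 - t) * pvPsum m t c + 2 ^ 35) from by
            rw [hpow1, show (2:Int) ^ 36 = 2 * 2 ^ 35 from by norm_num]; ring]
          rw [pvShiftRight_two_mul, hsh]
          nlinarith [hp35]
      · rw [if_neg hcv, if_neg hcv]
        rw [hpow1, mul_assoc, pvShiftRight_two_mul]
        ring
    · show ((1:Int) <<< t) <<< (1:Nat) = (1:Int) <<< (t + 1)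
      simp [Int.shiftLeft_eq]
      ring
    · show (if PySem.Int.band m ((1:Int) <<< t) ≠ 0
          then ((pvBits m t).length : Int) + 1 else ((pvBits m t).length : Int))
          = ((pvBits m (t + 1)).length : Int)
      rw [pvBits_succ, List.length_append]
      split <;> simp

-- ===== VERDICT (by name: the statement is the Claim_ definition above) =====
theorem generate_bitmasks_spec : Claim_equal_generate_bitmasks := by
  intro m _ hpre
  unfold Spec_generate_bitmasks
  simp only [generate_bitmasks, generate_bitmasks_alt]
  have hbc : (pvShiftLoop m 0).toNat = PySem.Int.bitCount m := by
    rw [pvShiftLoop_eq m hpre 0]; simp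
  rw [hbc]
  have h01 : ∀ c ∈ pvProduct01 (PySem.Int.bitCount m), ∀ x ∈ c, x = 0 ∨ x = 1 :=
    fun c hc => mem_pvProduct01 hc
  rw [pvFoldl_inv m (pvProduct01 (PySem.Int.bitCount m)) h01 36 (by norm_num)]
  simp only [Nat.sub_self, pow_zero, one_mul]
  apply List.map_congr_left
  intro c hc
  simp [pvPsum, pvBits]
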